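-- pv_equiv track=rewrite | github.com/plturrell/finsightdeep_mctx_enterprise | mctx/enterprise/hana_query_cache.py | use_materialized_views
-- ===== SOURCE A (Python) =====
-- def use_materialized_views(query: str) -> str:
--     """Replace tables with materialized views when applicable.
--
--     Args:
--         query: The SQL query string.
--
--     Returns:
--         The query with tables replaced by materialized views where appropriate.
--     """
--     # View mappings: table pattern -> materialized view
--     view_mappings = {
--         # Tagged trees view
--         "FROM MCTX.MCTS_TREES WHERE JSON_EXISTS(metadata, '$.tags')":
--             "FROM MCTX.MV_TAGGED_TREES",
--         "FROM MCTS_TREES WHERE JSON_EXISTS(metadata, '$.tags')":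
--             "FROM MCTX.MV_TAGGED_TREES",
--
--         # GPU trees view
--         "FROM MCTX.MCTS_TREES WHERE JSON_VALUE(metadata, '$.gpu_accelerated') = 'true'":
--             "FROM MCTX.MV_GPU_TREES WHERE gpu_accelerated = 'true'",
--         "FROM MCTS_TREES WHERE JSON_VALUE(metadata, '$.gpu_accelerated') = 'true'":
--             "FROM MCTX.MV_GPU_TREES WHERE gpu_accelerated = 'true'",
--
--         # Performance metrics view
--         "FROM MCTX.MCTS_TREES WHERE JSON_EXISTS(metadata, '$.performance')":
--             "FROM MCTX.MV_PERFORMANCE_METRICS",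
--         "FROM MCTS_TREES WHERE JSON_EXISTS(metadata, '$.performance')":
--             "FROM MCTX.MV_PERFORMANCE_METRICS"
--     }
--
--     # Apply mappings
--     transformed_query = query
--     for pattern, replacement in view_mappings.items():
--         if pattern in transformed_query:
--             transformed_query = transformed_query.replace(pattern, replacement)
--
--     return transformed_query
-- ===== SOURCE B (Python) =====
-- def use_materialized_views(query: str) -> str:
--     """Replace tables with materialized views when applicable (single left-to-right scan)."""
--     mappings = [
--         ("FROM MCTX.MCTS_TREES WHERE JSON_EXISTS(metadata, '$.tags')",
--          "FROM MCTX.MV_TAGGED_TREES"),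
--         ("FROM MCTS_TREES WHERE JSON_EXISTS(metadata, '$.tags')",
--          "FROM MCTX.MV_TAGGED_TREES"),
--         ("FROM MCTX.MCTS_TREES WHERE JSON_VALUE(metadata, '$.gpu_accelerated') = 'true'",
--          "FROM MCTX.MV_GPU_TREES WHERE gpu_accelerated = 'true'"),
--         ("FROM MCTS_TREES WHERE JSON_VALUE(metadata, '$.gpu_accelerated') = 'true'",
--          "FROM MCTX.MV_GPU_TREES WHERE gpu_accelerated = 'true'"),
--         ("FROM MCTX.MCTS_TREES WHERE JSON_EXISTS(metadata, '$.performance')",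
--          "FROM MCTX.MV_PERFORMANCE_METRICS"),
--         ("FROM MCTS_TREES WHERE JSON_EXISTS(metadata, '$.performance')",
--          "FROM MCTX.MV_PERFORMANCE_METRICS"),
--     ]
--     pieces = []
--     i = 0
--     n = len(query)
--     while i < n:
--         for pat, rep in mappings:
--             if query.startswith(pat, i):
--                 pieces.append(rep)
--                 i += len(pat)
--                 break
--         else:
--             pieces.append(query[i])
--             i += 1
--     return "".join(pieces)
-- ===== Notes on version B (the rewrite author's own statement) =====
-- stated objective: alternative
-- what changed: A makes six sequential full-string passes (one 'in' check plus one str.replace per mapping); B makes a single left-to-right scan over the query, emitting at each position the replacement of the first matching table pattern (valid because every pattern and replacement starts with 'FROM' and no pattern can begin inside another match or inside emitted replacement text).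
import Mathlib
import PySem

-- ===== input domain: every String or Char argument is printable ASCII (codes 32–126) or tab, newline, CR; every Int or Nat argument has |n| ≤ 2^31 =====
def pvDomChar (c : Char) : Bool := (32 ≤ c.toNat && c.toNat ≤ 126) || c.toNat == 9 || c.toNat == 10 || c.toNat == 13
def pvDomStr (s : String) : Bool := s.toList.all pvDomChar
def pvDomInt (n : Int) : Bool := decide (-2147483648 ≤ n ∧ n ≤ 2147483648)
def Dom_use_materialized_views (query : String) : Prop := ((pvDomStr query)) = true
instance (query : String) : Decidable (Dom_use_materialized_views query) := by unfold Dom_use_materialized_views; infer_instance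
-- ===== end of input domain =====

set_option maxRecDepth 8000
set_option maxHeartbeats 2000000

-- B replaces A's six sequential full-string `str.replace` passes by ONE left-to-right scan that
-- emits the replacement of the first pattern matching at each position (objective: alternative).

-- the six (table pattern, materialized view) pairs, in the dict's insertion order
def pvP1s : String := "FROM MCTX.MCTS_TREES WHERE JSON_EXISTS(metadata, '$.tags')"
def pvP2s : String := "FROM MCTS_TREES WHERE JSON_EXISTS(metadata, '$.tags')"
def pvP3s : String := "FROM MCTX.MCTS_TREES WHERE JSON_VALUE(metadata, '$.gpu_accelerated') = 'true'"
def pvP4s : String := "FROM MCTS_TREES WHERE JSON_VALUE(metadata, '$.gpu_accelerated') = 'true'"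
def pvP5s : String := "FROM MCTX.MCTS_TREES WHERE JSON_EXISTS(metadata, '$.performance')"
def pvP6s : String := "FROM MCTS_TREES WHERE JSON_EXISTS(metadata, '$.performance')"
def pvR1s : String := "FROM MCTX.MV_TAGGED_TREES"
def pvR3s : String := "FROM MCTX.MV_GPU_TREES WHERE gpu_accelerated = 'true'"
def pvR5s : String := "FROM MCTX.MV_PERFORMANCE_METRICS"

-- ===== PORT A =====
-- A's view_mappings dict, iterated with .items() in insertion order → association list
def pvViewMappings : List (String × String) :=
  [(pvP1s, pvR1s), (pvP2s, pvR1s), (pvP3s, pvR3s), (pvP4s, pvR3s), (pvP5s, pvR5s), (pvP6s, pvR5s)]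

def use_materialized_views (query : String) : String :=
  pvViewMappings.foldl
    (fun transformed_query pr =>
      if PySem.Str.isIn pr.1 transformed_query
      then PySem.Str.replace transformed_query pr.1 pr.2
      else transformed_query)
    query

-- ===== PORT B =====
-- Source B's `mappings` list, at the character level
def pvScanTable : List (List Char × List Char) :=
  [(pvP1s.toList, pvR1s.toList), (pvP2s.toList, pvR1s.toList), (pvP3s.toList, pvR3s.toList),
   (pvP4s.toList, pvR3s.toList), (pvP5s.toList, pvR5s.toList), (pvP6s.toList, pvR5s.toList)]

-- Source B's while-loop: at each position try the patterns in order; on a match emit the replacement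
-- and skip the pattern, else keep the character.  All table patterns are nonempty, so
-- `t.drop (pr.1.length - 1)` is exactly Python's `i += len(pat)` after consuming the head char.
def pvScan : List Char → List Char
  | [] => []
  | c :: t =>
    match pvScanTable.find? (fun pr => pr.1.isPrefixOf (c :: t)) with
    | some pr => pr.2 ++ pvScan (t.drop (pr.1.length - 1))
    | none => c :: pvScan t
  termination_by s => s.length
  decreasing_by all_goals (simp; try omega)

def use_materialized_views_alt (query : String) : String :=
  String.ofList (pvScan query.toList)

-- ===== PRECONDITION & SPEC =====
def Spec_use_materialized_views (query : String) (out : String) : Prop := out = use_materialized_views_alt query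
instance (query : String) (out : String) : Decidable (Spec_use_materialized_views query out) := by unfold Spec_use_materialized_views; infer_instance

-- ===== CLAIM (what is proved, stated in full; the proofs are below) =====
def Claim_equal_use_materialized_views : Prop := ∀ (query : String), Dom_use_materialized_views query → Spec_use_materialized_views query (use_materialized_views query)

-- ===== LEMMAS AND PROOFS =====

-- proof-side model of Python's s.replace(old, new) for nonempty old (fuel-free recursion)
def pvRepl (old new : List Char) : List Char → List Char
  | [] => []
  | c :: t =>
    if old.isPrefixOf (c :: t) then new ++ pvRepl old new (t.drop (old.length - 1))
    else c :: pvRepl old new t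
  termination_by l => l.length
  decreasing_by all_goals (simp; try omega)

def pvFold (z : List Char) : List Char := pvScanTable.foldl (fun s pr => pvRepl pr.1 pr.2 s) z

lemma pvRepl_nil (old new : List Char) : pvRepl old new [] = [] := by simp [pvRepl]

lemma pvRepl_cons_pos (old new : List Char) (c : Char) (t : List Char) (h : old <+: (c :: t)) :
    pvRepl old new (c :: t) = new ++ pvRepl old new (t.drop (old.length - 1)) := by
  rw [pvRepl]
  simp [List.isPrefixOf_iff_prefix, h]

lemma pvRepl_cons_neg (old new : List Char) (c : Char) (t : List Char) (h : ¬ old <+: (c :: t)) :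
    pvRepl old new (c :: t) = c :: pvRepl old new t := by
  rw [pvRepl]
  simp [List.isPrefixOf_iff_prefix, h]

lemma pvRepl_match (old new v : List Char) (h : old ≠ []) :
    pvRepl old new (old ++ v) = new ++ pvRepl old new v := by
  cases old with
  | nil => exact absurd rfl h
  | cons a p' =>
    have hpre : (a :: p') <+: a :: (p' ++ v) := by
      rw [← List.cons_append]; exact List.prefix_append _ _
    rw [List.cons_append, pvRepl_cons_pos _ _ _ _ hpre]
    simp

lemma pvGo (old new : List Char) (hold : old ≠ []) :
    ∀ (fuel : Nat) (l acc : List Char), l.length ≤ fuel →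
      PySem.Chars.replace.go old new fuel l acc = acc.reverse ++ pvRepl old new l := by
  intro fuel
  induction fuel with
  | zero =>
    intro l acc h
    have hz : l = [] := by cases l <;> simp_all
    subst hz
    simp [PySem.Chars.replace.go, pvRepl_nil]
  | succ n ih =>
    intro l acc h
    cases l with
    | nil => simp [PySem.Chars.replace.go, pvRepl_nil]
    | cons c t =>
      obtain ⟨a, p', rfl⟩ : ∃ a p', old = a :: p' := by
        cases old with
        | nil => exact absurd rfl hold
        | cons a p' => exact ⟨a, p', rfl⟩
      rw [show PySem.Chars.replace.go (a :: p') new (n+1) (c :: t) acc =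
            (if (a :: p').isPrefixOf (c :: t) then
              PySem.Chars.replace.go (a :: p') new n (List.drop (a :: p').length (c :: t)) (new.reverse ++ acc)
            else PySem.Chars.replace.go (a :: p') new n t (c :: acc)) from rfl]
      by_cases hp : (a :: p').isPrefixOf (c :: t)
      · rw [if_pos hp]
        have hd : List.drop (a :: p').length (c :: t) = t.drop ((a :: p').length - 1) := by simp
        rw [hd, ih _ _ (by simp at h ⊢; omega),
            pvRepl_cons_pos _ _ _ _ (List.isPrefixOf_iff_prefix.mp hp)]
        simp
      · rw [if_neg hp, ih _ _ (by simp at h ⊢; omega),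
            pvRepl_cons_neg _ _ _ _ (fun hh => hp (List.isPrefixOf_iff_prefix.mpr hh))]
        simp

lemma pvReplaceEq (s old new : List Char) (h : old ≠ []) :
    PySem.Chars.replace s old new = pvRepl old new s := by
  rw [PySem.Chars.replace, if_neg (by simpa using h)]
  simpa using pvGo old new h s.length s [] le_rfl

lemma pvRepl_not_infix (old new s : List Char) (h : ¬ old <:+: s) : pvRepl old new s = s := by
  induction s with
  | nil => exact pvRepl_nil _ _
  | cons c t ih =>
    rw [pvRepl_cons_neg _ _ _ _ (fun hp => h hp.isInfix),
        ih (fun hi => h (hi.trans (List.suffix_cons c t).isInfix))]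

-- no occurrence of p can start inside w (even extending past w into the continuation)
def pvSafe (p w : List Char) : Prop := ∀ m, m < w.length → ¬ (p.take (w.length - m) <+: w.drop m)

lemma pvPrefixTake {p w u : List Char} (h : p <+: w ++ u) : p.take w.length <+: w := by
  have h2 := h.take w.length
  rwa [List.take_left] at h2

lemma pvPass (p r w : List Char) (hs : pvSafe p w) : ∀ u, pvRepl p r (w ++ u) = w ++ pvRepl p r u := by
  induction w with
  | nil => simp
  | cons a w' ih =>
    intro u
    have hnp : ¬ p <+: (a :: w') ++ u := fun hp =>
      hs 0 (by simp) (by simpa using pvPrefixTake hp)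
    have hs' : pvSafe p w' := by
      intro m hm
      have := hs (m + 1) (by simp; omega)
      simpa [Nat.succ_sub_succ] using this
    rw [show (a :: w') ++ u = a :: (w' ++ u) from rfl,
        pvRepl_cons_neg _ _ _ _ (by exact hnp), ih hs' u]
    rfl

lemma pvHeadF (p r' v : List Char) : ∃ y, pvRepl p ('F' :: r') ('F' :: v) = 'F' :: y := by
  by_cases hp : p <+: ('F' :: v)
  · exact ⟨r' ++ pvRepl p ('F' :: r') (v.drop (p.length - 1)),
      by rw [pvRepl_cons_pos _ _ _ _ hp]; rfl⟩
  · exact ⟨pvRepl p ('F' :: r') v, by rw [pvRepl_cons_neg _ _ _ _ hp]⟩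

lemma pvDropHead (z : List Char) (b : Char) (v : List Char)
    (h : z.dropWhile (fun a => a != 'F') = b :: v) : b = 'F' := by
  have h2 : z.dropWhile (fun a => a != 'F') ≠ [] := by simp [h]
  have h3 := List.head_dropWhile_not (l := z) (p := fun a => a != 'F') h2
  have h4 : (z.dropWhile (fun a => a != 'F')).head h2 = b := by simp [h]
  rw [h4] at h3
  simpa using h3

-- an 'F'-free pattern-tail that does not yet match cannot start matching after a replace pass
lemma pvT (p' r' t : List Char) (htF : ∀ a ∈ t, a ≠ 'F') :
    ∀ z, ¬ t <+: z → ¬ t <+: pvRepl ('F' :: p') ('F' :: r') z := by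
  intro z hnp hpre
  have hzdec : z.takeWhile (fun a => a != 'F') ++ z.dropWhile (fun a => a != 'F') = z :=
    List.takeWhile_append_dropWhile
  set w := z.takeWhile (fun a => a != 'F') with hw
  set rest := z.dropWhile (fun a => a != 'F') with hrest
  have hwz : w <+: z := ⟨rest, hzdec⟩
  have hwF : ∀ a ∈ w, a ≠ 'F' := fun a ha => by
    simpa using List.mem_takeWhile_imp ha
  have hsafe : pvSafe ('F' :: p') w := by
    intro m hm hpp
    obtain ⟨k, hk⟩ : ∃ k, w.length - m = k + 1 := ⟨w.length - m - 1, by omega⟩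
    rw [hk] at hpp
    simp only [List.take_succ_cons] at hpp
    obtain ⟨u, hu⟩ := hpp
    have hFdrop : 'F' ∈ List.drop m w := by rw [← hu]; simp
    exact hwF 'F' (List.mem_of_mem_drop hFdrop) rfl
  have hrw : pvRepl ('F' :: p') ('F' :: r') z = w ++ pvRepl ('F' :: p') ('F' :: r') rest := by
    conv_lhs => rw [← hzdec]
    exact pvPass _ _ _ hsafe rest
  rw [hrw] at hpre
  cases hre : rest with
  | nil =>
    rw [hre, pvRepl_nil] at hpre
    simp only [List.append_nil] at hpre
    exact hnp (hpre.trans hwz)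
  | cons b v =>
    have hbF : b = 'F' := pvDropHead z b v (by rw [← hrest]; exact hre)
    subst hbF
    obtain ⟨y, hy⟩ := pvHeadF ('F' :: p') r' v
    rw [hre, hy] at hpre
    by_cases hlen : t.length ≤ w.length
    · exact hnp (((List.isPrefix_append_of_length hlen).mp hpre).trans hwz)
    · have hi : w.length < t.length := by omega
      have hget := hpre.getElem (i := w.length) hi
      exact htF _ (List.getElem_mem hi) (hget.trans (List.getElem_of_append rfl rfl))

lemma pvT' (p r t : List Char) (hp : ∃ p', p = 'F' :: p') (hr : ∃ r', r = 'F' :: r')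
    (htF : ∀ a ∈ t, a ≠ 'F') (z : List Char) (hnp : ¬ t <+: z) : ¬ t <+: pvRepl p r z := by
  obtain ⟨p', rfl⟩ := hp
  obtain ⟨r', rfl⟩ := hr
  exact pvT p' r' t htF z hnp

lemma pvHeadNe (p : List Char) (a : Char) (hp : p.head? = some 'F') (hc : a ≠ 'F')
    (x : List Char) : ¬ p <+: a :: x := by
  intro h
  cases p with
  | nil => simp at hp
  | cons b p'' =>
    have := (List.cons_prefix_cons.mp h).1
    simp at hp
    exact hc (by rw [← this, hp])

lemma pvConsNP (p : List Char) (p0 : p = 'F' :: p.tail) (x : List Char)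
    (h : ¬ p.tail <+: x) : ¬ p <+: 'F' :: x := by
  intro hh
  rw [p0] at hh
  exact h (List.cons_prefix_cons.mp hh).2

lemma pvScanConsNone (c : Char) (t : List Char)
    (hfind : pvScanTable.find? (fun pr => pr.1.isPrefixOf (c :: t)) = none) :
    pvScan (c :: t) = c :: pvScan t := by
  rw [pvScan, hfind]

lemma pvScanBlock (p r v : List Char) (hp : p ≠ [])
    (hfind : pvScanTable.find? (fun pr => pr.1.isPrefixOf (p ++ v)) = some (p, r)) :
    pvScan (p ++ v) = r ++ pvScan v := by
  cases p with
  | nil => exact absurd rfl hp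
  | cons a p' =>
    have hfind' : pvScanTable.find? (fun pr => pr.1.isPrefixOf (a :: (p' ++ v))) = some (a :: p', r) := hfind
    rw [show (a :: p') ++ v = a :: (p' ++ v) from rfl, pvScan, hfind']
    simp

-- the six patterns and three replacements all start with 'F', and no pattern's tail contains 'F'
lemma pvE1 : pvP1s.toList = 'F' :: pvP1s.toList.tail := by decide
lemma pvE2 : pvP2s.toList = 'F' :: pvP2s.toList.tail := by decide
lemma pvE3 : pvP3s.toList = 'F' :: pvP3s.toList.tail := by decide
lemma pvE4 : pvP4s.toList = 'F' :: pvP4s.toList.tail := by decide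
lemma pvE5 : pvP5s.toList = 'F' :: pvP5s.toList.tail := by decide
lemma pvE6 : pvP6s.toList = 'F' :: pvP6s.toList.tail := by decide
lemma pvEr1 : pvR1s.toList = 'F' :: pvR1s.toList.tail := by decide
lemma pvEr3 : pvR3s.toList = 'F' :: pvR3s.toList.tail := by decide
lemma pvEr5 : pvR5s.toList = 'F' :: pvR5s.toList.tail := by decide
lemma pvFhelp (l : List Char) (h : l.all (fun a => a != 'F') = true) : ∀ a ∈ l, a ≠ 'F' := by
  simpa [List.all_eq_true] using h

lemma pvF2 : ∀ a ∈ pvP2s.toList.tail, a ≠ 'F' := pvFhelp _ (by decide)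
lemma pvF3 : ∀ a ∈ pvP3s.toList.tail, a ≠ 'F' := pvFhelp _ (by decide)
lemma pvF4 : ∀ a ∈ pvP4s.toList.tail, a ≠ 'F' := pvFhelp _ (by decide)
lemma pvF5 : ∀ a ∈ pvP5s.toList.tail, a ≠ 'F' := pvFhelp _ (by decide)
lemma pvF6 : ∀ a ∈ pvP6s.toList.tail, a ≠ 'F' := pvFhelp _ (by decide)

lemma pvTailNP (p : List Char) (p0 : p = 'F' :: p.tail) (t : List Char)
    (h : ¬ p <+: 'F' :: t) : ¬ p.tail <+: t := fun hh =>
  h (by rw [p0]; exact List.cons_prefix_cons.mpr ⟨rfl, hh⟩)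

lemma pvChain (c : Char) (t : List Char)
    (h1 : ¬ pvP1s.toList <+: c :: t) (h2 : ¬ pvP2s.toList <+: c :: t)
    (h3 : ¬ pvP3s.toList <+: c :: t) (h4 : ¬ pvP4s.toList <+: c :: t)
    (h5 : ¬ pvP5s.toList <+: c :: t) (h6 : ¬ pvP6s.toList <+: c :: t) :
    pvFold (c :: t) = c :: pvFold t := by
  simp only [pvFold, pvScanTable, List.foldl]
  by_cases hc : c = 'F'
  · subst hc
    have g2 := pvTailNP _ pvE2 _ h2
    have g3 := pvTailNP _ pvE3 _ h3
    have g4 := pvTailNP _ pvE4 _ h4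
    have g5 := pvTailNP _ pvE5 _ h5
    have g6 := pvTailNP _ pvE6 _ h6
    have a1 : ∃ p', pvP1s.toList = 'F' :: p' := ⟨_, pvE1⟩
    have a2 : ∃ p', pvP2s.toList = 'F' :: p' := ⟨_, pvE2⟩
    have a3 : ∃ p', pvP3s.toList = 'F' :: p' := ⟨_, pvE3⟩
    have a4 : ∃ p', pvP4s.toList = 'F' :: p' := ⟨_, pvE4⟩
    have a5 : ∃ p', pvP5s.toList = 'F' :: p' := ⟨_, pvE5⟩
    have b1 : ∃ r', pvR1s.toList = 'F' :: r' := ⟨_, pvEr1⟩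
    have b3 : ∃ r', pvR3s.toList = 'F' :: r' := ⟨_, pvEr3⟩
    have b5 : ∃ r', pvR5s.toList = 'F' :: r' := ⟨_, pvEr5⟩
    have n2 := pvConsNP _ pvE2 _ (pvT' _ _ _ a1 b1 pvF2 t g2)
    have n3 := pvConsNP _ pvE3 _
      (pvT' _ _ _ a2 b1 pvF3 _ (pvT' _ _ _ a1 b1 pvF3 t g3))
    have n4 := pvConsNP _ pvE4 _
      (pvT' _ _ _ a3 b3 pvF4 _ (pvT' _ _ _ a2 b1 pvF4 _ (pvT' _ _ _ a1 b1 pvF4 t g4)))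
    have n5 := pvConsNP _ pvE5 _
      (pvT' _ _ _ a4 b3 pvF5 _ (pvT' _ _ _ a3 b3 pvF5 _
        (pvT' _ _ _ a2 b1 pvF5 _ (pvT' _ _ _ a1 b1 pvF5 t g5))))
    have n6 := pvConsNP _ pvE6 _
      (pvT' _ _ _ a5 b5 pvF6 _ (pvT' _ _ _ a4 b3 pvF6 _ (pvT' _ _ _ a3 b3 pvF6 _
        (pvT' _ _ _ a2 b1 pvF6 _ (pvT' _ _ _ a1 b1 pvF6 t g6)))))
    rw [pvRepl_cons_neg _ _ _ _ h1, pvRepl_cons_neg _ _ _ _ n2, pvRepl_cons_neg _ _ _ _ n3,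
        pvRepl_cons_neg _ _ _ _ n4, pvRepl_cons_neg _ _ _ _ n5, pvRepl_cons_neg _ _ _ _ n6]
  · rw [pvRepl_cons_neg _ _ _ _ h1,
        pvRepl_cons_neg _ _ _ _ (pvHeadNe pvP2s.toList c (by decide) hc _),
        pvRepl_cons_neg _ _ _ _ (pvHeadNe pvP3s.toList c (by decide) hc _),
        pvRepl_cons_neg _ _ _ _ (pvHeadNe pvP4s.toList c (by decide) hc _),
        pvRepl_cons_neg _ _ _ _ (pvHeadNe pvP5s.toList c (by decide) hc _),
        pvRepl_cons_neg _ _ _ _ (pvHeadNe pvP6s.toList c (by decide) hc _)]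

lemma pvStrStep (tq p r : String) :
    (if PySem.Str.isIn p tq then PySem.Str.replace tq p r else tq).toList
    = (if PySem.Chars.isIn p.toList tq.toList then
        PySem.Chars.replace tq.toList p.toList r.toList else tq.toList) := by
  simp only [show PySem.Str.isIn p tq = PySem.Chars.isIn p.toList tq.toList from rfl]
  by_cases h : PySem.Chars.isIn p.toList tq.toList <;> simp [h, PySem.Str.toList_replace]

lemma pvCondStep (s old new : List Char) (h : old ≠ []) :
    (if PySem.Chars.isIn old s then PySem.Chars.replace s old new else s) = pvRepl old new s := by
  by_cases hin : PySem.Chars.isIn old s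
  · rw [if_pos hin]
    exact pvReplaceEq s old new h
  · rw [if_neg hin]
    exact (pvRepl_not_infix old new s
      ((PySem.Chars.isIn_eq_false_iff old s).mp (by simpa using hin))).symm

lemma pvA_toList (q : String) : (use_materialized_views q).toList = pvFold q.toList := by
  simp only [use_materialized_views, pvViewMappings, List.foldl, pvFold, pvScanTable]
  rw [pvStrStep, pvStrStep, pvStrStep, pvStrStep, pvStrStep, pvStrStep,
      pvCondStep _ _ _ (by decide), pvCondStep _ _ _ (by decide), pvCondStep _ _ _ (by decide),
      pvCondStep _ _ _ (by decide), pvCondStep _ _ _ (by decide), pvCondStep _ _ _ (by decide)]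

lemma pvMain : ∀ (n : Nat) (z : List Char), z.length ≤ n → pvFold z = pvScan z := by
  intro n
  induction n with
  | zero =>
    intro z h
    have hz : z = [] := by cases z <;> simp_all
    subst hz
    simp [pvFold, pvScanTable, pvRepl_nil, pvScan]
  | succ n ih =>
    intro z hlen
    cases z with
    | nil => simp [pvFold, pvScanTable, pvRepl_nil, pvScan]
    | cons c t =>
      simp only [List.length_cons] at hlen
      by_cases h1 : pvP1s.toList <+: c :: t
      · obtain ⟨v, hv⟩ := h1
        rw [← hv]
        have hl := congrArg List.length hv
        simp only [List.length_append, List.length_cons] at hl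
        have hp0 : 0 < pvP1s.toList.length := by decide
        have hF : pvFold (pvP1s.toList ++ v) = pvR1s.toList ++ pvFold v := by
          simp only [pvFold, pvScanTable, List.foldl]
          rw [pvRepl_match _ _ _ (by decide),
              pvPass pvP2s.toList pvR1s.toList pvR1s.toList (by unfold pvSafe; decide),
              pvPass pvP3s.toList pvR3s.toList pvR1s.toList (by unfold pvSafe; decide),
              pvPass pvP4s.toList pvR3s.toList pvR1s.toList (by unfold pvSafe; decide),
              pvPass pvP5s.toList pvR5s.toList pvR1s.toList (by unfold pvSafe; decide),
              pvPass pvP6s.toList pvR5s.toList pvR1s.toList (by unfold pvSafe; decide)]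
        have hfind : pvScanTable.find? (fun pr => pr.1.isPrefixOf (pvP1s.toList ++ v))
            = some (pvP1s.toList, pvR1s.toList) := by
          simp only [pvScanTable]
          exact List.find?_cons_of_pos (List.isPrefixOf_iff_prefix.mpr (List.prefix_append _ _))
        rw [hF, pvScanBlock _ _ v (by decide) hfind, ih v (by omega)]
      · by_cases h2 : pvP2s.toList <+: c :: t
        · obtain ⟨v, hv⟩ := h2
          rw [← hv]
          rw [← hv] at h1
          have hl := congrArg List.length hv
          simp only [List.length_append, List.length_cons] at hl
          have hp0 : 0 < pvP2s.toList.length := by decide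
          have hF : pvFold (pvP2s.toList ++ v) = pvR1s.toList ++ pvFold v := by
            simp only [pvFold, pvScanTable, List.foldl]
            rw [pvPass pvP1s.toList pvR1s.toList pvP2s.toList (by unfold pvSafe; decide),
                pvRepl_match _ _ _ (by decide),
                pvPass pvP3s.toList pvR3s.toList pvR1s.toList (by unfold pvSafe; decide),
                pvPass pvP4s.toList pvR3s.toList pvR1s.toList (by unfold pvSafe; decide),
                pvPass pvP5s.toList pvR5s.toList pvR1s.toList (by unfold pvSafe; decide),
                pvPass pvP6s.toList pvR5s.toList pvR1s.toList (by unfold pvSafe; decide)]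
          have hfind : pvScanTable.find? (fun pr => pr.1.isPrefixOf (pvP2s.toList ++ v))
              = some (pvP2s.toList, pvR1s.toList) := by
            simp only [pvScanTable]
            rw [List.find?_cons_of_neg (by simp [List.isPrefixOf_iff_prefix]; exact h1)]
            exact List.find?_cons_of_pos (List.isPrefixOf_iff_prefix.mpr (List.prefix_append _ _))
          rw [hF, pvScanBlock _ _ v (by decide) hfind, ih v (by omega)]
        · by_cases h3 : pvP3s.toList <+: c :: t
          · obtain ⟨v, hv⟩ := h3
            rw [← hv]
            rw [← hv] at h1 h2
            have hl := congrArg List.length hv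
            simp only [List.length_append, List.length_cons] at hl
            have hp0 : 0 < pvP3s.toList.length := by decide
            have hF : pvFold (pvP3s.toList ++ v) = pvR3s.toList ++ pvFold v := by
              simp only [pvFold, pvScanTable, List.foldl]
              rw [pvPass pvP1s.toList pvR1s.toList pvP3s.toList (by unfold pvSafe; decide),
                  pvPass pvP2s.toList pvR1s.toList pvP3s.toList (by unfold pvSafe; decide),
                  pvRepl_match _ _ _ (by decide),
                  pvPass pvP4s.toList pvR3s.toList pvR3s.toList (by unfold pvSafe; decide),
                  pvPass pvP5s.toList pvR5s.toList pvR3s.toList (by unfold pvSafe; decide),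
                  pvPass pvP6s.toList pvR5s.toList pvR3s.toList (by unfold pvSafe; decide)]
            have hfind : pvScanTable.find? (fun pr => pr.1.isPrefixOf (pvP3s.toList ++ v))
                = some (pvP3s.toList, pvR3s.toList) := by
              simp only [pvScanTable]
              rw [List.find?_cons_of_neg (by simp [List.isPrefixOf_iff_prefix]; exact h1),
                  List.find?_cons_of_neg (by simp [List.isPrefixOf_iff_prefix]; exact h2)]
              exact List.find?_cons_of_pos (List.isPrefixOf_iff_prefix.mpr (List.prefix_append _ _))
            rw [hF, pvScanBlock _ _ v (by decide) hfind, ih v (by omega)]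
          · by_cases h4 : pvP4s.toList <+: c :: t
            · obtain ⟨v, hv⟩ := h4
              rw [← hv]
              rw [← hv] at h1 h2 h3
              have hl := congrArg List.length hv
              simp only [List.length_append, List.length_cons] at hl
              have hp0 : 0 < pvP4s.toList.length := by decide
              have hF : pvFold (pvP4s.toList ++ v) = pvR3s.toList ++ pvFold v := by
                simp only [pvFold, pvScanTable, List.foldl]
                rw [pvPass pvP1s.toList pvR1s.toList pvP4s.toList (by unfold pvSafe; decide),
                    pvPass pvP2s.toList pvR1s.toList pvP4s.toList (by unfold pvSafe; decide),
                    pvPass pvP3s.toList pvR3s.toList pvP4s.toList (by unfold pvSafe; decide),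
                    pvRepl_match _ _ _ (by decide),
                    pvPass pvP5s.toList pvR5s.toList pvR3s.toList (by unfold pvSafe; decide),
                    pvPass pvP6s.toList pvR5s.toList pvR3s.toList (by unfold pvSafe; decide)]
              have hfind : pvScanTable.find? (fun pr => pr.1.isPrefixOf (pvP4s.toList ++ v))
                  = some (pvP4s.toList, pvR3s.toList) := by
                simp only [pvScanTable]
                rw [List.find?_cons_of_neg (by simp [List.isPrefixOf_iff_prefix]; exact h1),
                    List.find?_cons_of_neg (by simp [List.isPrefixOf_iff_prefix]; exact h2),
                    List.find?_cons_of_neg (by simp [List.isPrefixOf_iff_prefix]; exact h3)]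
                exact List.find?_cons_of_pos (List.isPrefixOf_iff_prefix.mpr (List.prefix_append _ _))
              rw [hF, pvScanBlock _ _ v (by decide) hfind, ih v (by omega)]
            · by_cases h5 : pvP5s.toList <+: c :: t
              · obtain ⟨v, hv⟩ := h5
                rw [← hv]
                rw [← hv] at h1 h2 h3 h4
                have hl := congrArg List.length hv
                simp only [List.length_append, List.length_cons] at hl
                have hp0 : 0 < pvP5s.toList.length := by decide
                have hF : pvFold (pvP5s.toList ++ v) = pvR5s.toList ++ pvFold v := by
                  simp only [pvFold, pvScanTable, List.foldl]
                  rw [pvPass pvP1s.toList pvR1s.toList pvP5s.toList (by unfold pvSafe; decide),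
                      pvPass pvP2s.toList pvR1s.toList pvP5s.toList (by unfold pvSafe; decide),
                      pvPass pvP3s.toList pvR3s.toList pvP5s.toList (by unfold pvSafe; decide),
                      pvPass pvP4s.toList pvR3s.toList pvP5s.toList (by unfold pvSafe; decide),
                      pvRepl_match _ _ _ (by decide),
                      pvPass pvP6s.toList pvR5s.toList pvR5s.toList (by unfold pvSafe; decide)]
                have hfind : pvScanTable.find? (fun pr => pr.1.isPrefixOf (pvP5s.toList ++ v))
                    = some (pvP5s.toList, pvR5s.toList) := by
                  simp only [pvScanTable]
                  rw [List.find?_cons_of_neg (by simp [List.isPrefixOf_iff_prefix]; exact h1),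
                      List.find?_cons_of_neg (by simp [List.isPrefixOf_iff_prefix]; exact h2),
                      List.find?_cons_of_neg (by simp [List.isPrefixOf_iff_prefix]; exact h3),
                      List.find?_cons_of_neg (by simp [List.isPrefixOf_iff_prefix]; exact h4)]
                  exact List.find?_cons_of_pos (List.isPrefixOf_iff_prefix.mpr (List.prefix_append _ _))
                rw [hF, pvScanBlock _ _ v (by decide) hfind, ih v (by omega)]
              · by_cases h6 : pvP6s.toList <+: c :: t
                · obtain ⟨v, hv⟩ := h6
                  rw [← hv]
                  rw [← hv] at h1 h2 h3 h4 h5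
                  have hl := congrArg List.length hv
                  simp only [List.length_append, List.length_cons] at hl
                  have hp0 : 0 < pvP6s.toList.length := by decide
                  have hF : pvFold (pvP6s.toList ++ v) = pvR5s.toList ++ pvFold v := by
                    simp only [pvFold, pvScanTable, List.foldl]
                    rw [pvPass pvP1s.toList pvR1s.toList pvP6s.toList (by unfold pvSafe; decide),
                        pvPass pvP2s.toList pvR1s.toList pvP6s.toList (by unfold pvSafe; decide),
                        pvPass pvP3s.toList pvR3s.toList pvP6s.toList (by unfold pvSafe; decide),
                        pvPass pvP4s.toList pvR3s.toList pvP6s.toList (by unfold pvSafe; decide),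
                        pvPass pvP5s.toList pvR5s.toList pvP6s.toList (by unfold pvSafe; decide),
                        pvRepl_match _ _ _ (by decide)]
                  have hfind : pvScanTable.find? (fun pr => pr.1.isPrefixOf (pvP6s.toList ++ v))
                      = some (pvP6s.toList, pvR5s.toList) := by
                    simp only [pvScanTable]
                    rw [List.find?_cons_of_neg (by simp [List.isPrefixOf_iff_prefix]; exact h1),
                        List.find?_cons_of_neg (by simp [List.isPrefixOf_iff_prefix]; exact h2),
                        List.find?_cons_of_neg (by simp [List.isPrefixOf_iff_prefix]; exact h3),
                        List.find?_cons_of_neg (by simp [List.isPrefixOf_iff_prefix]; exact h4),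
                        List.find?_cons_of_neg (by simp [List.isPrefixOf_iff_prefix]; exact h5)]
                    exact List.find?_cons_of_pos (List.isPrefixOf_iff_prefix.mpr (List.prefix_append _ _))
                  rw [hF, pvScanBlock _ _ v (by decide) hfind, ih v (by omega)]
                · have hfind : pvScanTable.find? (fun pr => pr.1.isPrefixOf (c :: t)) = none := by
                    simp only [pvScanTable]
                    rw [List.find?_cons_of_neg (by simp [List.isPrefixOf_iff_prefix]; exact h1),
                        List.find?_cons_of_neg (by simp [List.isPrefixOf_iff_prefix]; exact h2),
                        List.find?_cons_of_neg (by simp [List.isPrefixOf_iff_prefix]; exact h3),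
                        List.find?_cons_of_neg (by simp [List.isPrefixOf_iff_prefix]; exact h4),
                        List.find?_cons_of_neg (by simp [List.isPrefixOf_iff_prefix]; exact h5),
                        List.find?_cons_of_neg (by simp [List.isPrefixOf_iff_prefix]; exact h6)]
                    rfl
                  rw [pvChain c t h1 h2 h3 h4 h5 h6, pvScanConsNone c t hfind, ih t (by omega)]

-- ===== VERDICT (by name: the statement is the Claim_ definition above) =====
theorem use_materialized_views_spec : Claim_equal_use_materialized_views := by
  intro q _
  unfold Spec_use_materialized_views
  have h1 : (use_materialized_views q).toList = pvScan q.toList :=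
    (pvA_toList q).trans (pvMain q.toList.length q.toList le_rfl)
  have h2 : use_materialized_views q = String.ofList (pvScan q.toList) := by
    rw [← h1, String.ofList_toList]
  exact h2
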